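-- pv_equiv track=rewrite | github.com/mitsuo0114/competitive_programming | python/atcoder/CODE THANKS FESTIVAL 2018/D.py | solve
-- ===== SOURCE A (Python) =====
-- def solve(S):
--     m = S[0]
--     ans = 0
--     for c in S:
--         if ord(c) <= ord(m):
--             ans += 1
--             m = c
--     return ans
-- ===== SOURCE B (Python) =====
-- def solve(S):
--     def rec(T, bound):
--         # (count of prefix-record positions in T given bound, min(bound, *T))
--         if len(T) == 1:
--             c = T[0]
--             return (1, c) if c <= bound else (0, bound)
--         mid = len(T) // 2
--         c1, m1 = rec(T[:mid], bound)
--         c2, m2 = rec(T[mid:], m1)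
--         return (c1 + c2, m2)
--     return rec(S, S[0])[0]
-- ===== Notes on version B (the rewrite author's own statement) =====
-- stated objective: alternative
-- what changed: A is a single iterative pass keeping a running-minimum accumulator; B is a divide-and-conquer recursion that splits the string in halves and combines (count, minimum) pairs, threading the left half's minimum into the right half.
import Mathlib
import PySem

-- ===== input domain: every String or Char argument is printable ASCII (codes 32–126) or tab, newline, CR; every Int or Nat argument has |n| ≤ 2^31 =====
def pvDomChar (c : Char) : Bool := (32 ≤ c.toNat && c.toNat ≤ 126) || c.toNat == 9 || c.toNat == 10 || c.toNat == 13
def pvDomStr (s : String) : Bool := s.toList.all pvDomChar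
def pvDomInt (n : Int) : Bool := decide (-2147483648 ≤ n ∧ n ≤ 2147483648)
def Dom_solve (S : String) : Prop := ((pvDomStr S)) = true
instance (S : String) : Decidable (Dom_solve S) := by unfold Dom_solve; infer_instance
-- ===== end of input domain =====

-- B replaces A's iterative running-minimum scan by a divide-and-conquer recursion on
-- halves combining (count, minimum) pairs; objective: alternative algorithm.

-- ===== PORT A =====
-- the for-loop of A: state (m, ans); ord(c) <= ord(m) is c.toNat ≤ m.toNat
def solveLoopA (l : List Char) (m : Char) (ans : Int) : Int :=
  match l with
  | [] => ans
  | c :: rest => if c.toNat ≤ m.toNat then solveLoopA rest c (ans + 1) else solveLoopA rest m ans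

def solve (S : String) : Int :=
  match PySem.Str.pyGet? S 0 with   -- S[0]: IndexError on "" (excluded by Pre_solve)
  | none => 0
  | some m => solveLoopA S.toList m 0

-- ===== PORT B =====
-- B's rec(T, bound): divide and conquer returning (count, min(bound, *T));
-- 'c <= bound' on single chars is code-point order. The [] arm is a totality guard:
-- rec is never called on an empty slice (Python's rec would recurse forever there).
def recB : List Char → Char → Int × Char
  | [], bound => (0, bound)
  | [c], bound => if c.toNat ≤ bound.toNat then (1, c) else (0, bound)
  | c1 :: c2 :: rest, bound =>
    let p1 := recB ((c1 :: c2 :: rest).take ((c1 :: c2 :: rest).length / 2)) bound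
    let p2 := recB ((c1 :: c2 :: rest).drop ((c1 :: c2 :: rest).length / 2)) p1.2
    (p1.1 + p2.1, p2.2)
termination_by T _ => T.length
decreasing_by
  · simp [List.length_take]; omega
  · simp [List.length_drop]; omega

def solve_alt (S : String) : Int :=
  match PySem.Str.pyGet? S 0 with   -- S[0]: IndexError on "" (excluded by Pre_solve)
  | none => 0
  | some b0 => (recB S.toList b0).1

-- ===== PRECONDITION & SPEC =====
-- A indexes S[0], raising IndexError on the empty string; Pre_ excludes exactly that.
def Pre_solve (S : String) : Prop := S ≠ ""
instance (S : String) : Decidable (Pre_solve S) := by unfold Pre_solve; infer_instance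
def pvWitness_solve : String := "cba"

def Spec_solve (S : String) (out : Int) : Prop := out = solve_alt S
instance (S : String) (out : Int) : Decidable (Spec_solve S out) := by unfold Spec_solve; infer_instance

-- ===== CLAIM (what is proved, stated in full; the proofs are below) =====
def Claim_equal_solve : Prop := ∀ (S : String), Dom_solve S → Pre_solve S → Spec_solve S (solve S)

-- ===== LEMMAS AND PROOFS =====

-- sequential reference: one pass computing both the count and the running minimum
def pairLoop : List Char → Char → Int × Char
  | [], m => (0, m)
  | c :: rest, m =>
    if c.toNat ≤ m.toNat then
      let p := pairLoop rest c
      (p.1 + 1, p.2)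
    else pairLoop rest m

lemma loopA_eq_pair (xs : List Char) (m : Char) (ans : Int) :
    solveLoopA xs m ans = ans + (pairLoop xs m).1 := by
  induction xs generalizing m ans with
  | nil => simp [solveLoopA, pairLoop]
  | cons c rest ih =>
    simp only [solveLoopA, pairLoop]
    by_cases h : c.toNat ≤ m.toNat
    · simp only [h, if_true]; rw [ih]; ring
    · simp only [h, if_false]; exact ih m ans

lemma pair_append (xs ys : List Char) (m : Char) :
    pairLoop (xs ++ ys) m =
      ((pairLoop xs m).1 + (pairLoop ys (pairLoop xs m).2).1,
       (pairLoop ys (pairLoop xs m).2).2) := by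
  induction xs generalizing m with
  | nil => simp [pairLoop]
  | cons c rest ih =>
    simp only [List.cons_append, pairLoop]
    by_cases h : c.toNat ≤ m.toNat
    · simp only [h, if_true, ih]; exact Prod.ext (by ring) rfl
    · simp only [h, if_false, ih]

lemma recB_eq_pair (T : List Char) (bound : Char) : recB T bound = pairLoop T bound := by
  induction hn : T.length using Nat.strong_induction_on generalizing T bound with
  | _ n ih =>
    match T with
    | [] => simp [recB, pairLoop]
    | [c] =>
      simp only [recB, pairLoop]
      by_cases h : c.toNat ≤ bound.toNat <;> simp [h, pairLoop]
    | c1 :: c2 :: rest =>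
      have hlen : (c1 :: c2 :: rest).length = rest.length + 2 := by simp
      set L : List Char := c1 :: c2 :: rest with hL
      set mid : Nat := L.length / 2 with hmid
      have h1 : (L.take mid).length < n := by
        subst hn; simp [List.length_take, hL]; omega
      have h2 : (L.drop mid).length < n := by
        subst hn; simp [List.length_drop, hL]; omega
      have hsplit : L.take mid ++ L.drop mid = L := List.take_append_drop _ _
      calc recB L bound
          = ((recB (L.take mid) bound).1 + (recB (L.drop mid) (recB (L.take mid) bound).2).1,
             (recB (L.drop mid) (recB (L.take mid) bound).2).2) := by
            rw [hL]; rw [recB]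
        _ = pairLoop L bound := by
            rw [ih _ h1 _ _ rfl, ih _ h2 _ _ rfl, ← pair_append, hsplit]

-- ===== VERDICT (by name: the statement is the Claim_ definition above) =====
theorem solve_spec : Claim_equal_solve := by
  intro S _ hpre
  unfold Spec_solve solve solve_alt
  have hne : S.toList ≠ [] := by
    intro h
    exact hpre (by simpa [String.toList_eq_nil_iff] using h)
  obtain ⟨h, t, hS⟩ := List.exists_cons_of_ne_nil hne
  have hget : PySem.Str.pyGet? S 0 = some h := by
    simp [PySem.Str.pyGet?, hS]
  rw [hget]
  show solveLoopA S.toList h 0 = (recB S.toList h).1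
  rw [loopA_eq_pair, recB_eq_pair]
  simp
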